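-- pv_equiv track=rewrite | github.com/amoor22/electrical-physics-calculator | claculations.py | clean_map
-- ===== SOURCE A (Python) =====
-- def clean_map(mp):
--     to_delete = []
--     to_add = {}
--     for i in mp:
--         if i.isupper():
--             to_add[i.lower()] = mp[i]
--             to_delete.append(i)
--     for i_lower in to_add:
--         mp[i_lower] = to_add[i_lower]
--     for j in to_delete:
--         del mp[j]
--     return mp
-- ===== SOURCE B (Python) =====
-- def clean_map(mp):
--     for key in list(mp):
--         if key.isupper():
--             mp[key.lower()] = mp.pop(key)
--     return mp
-- ===== Notes on version B (the rewrite author's own statement) =====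
-- stated objective: simpler
-- what changed: A's collect-then-apply structure (a to_add dict, a to_delete list and three separate loops) is replaced by one direct in-place pass over a snapshot of the keys doing mp[key.lower()] = mp.pop(key).
import Mathlib
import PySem

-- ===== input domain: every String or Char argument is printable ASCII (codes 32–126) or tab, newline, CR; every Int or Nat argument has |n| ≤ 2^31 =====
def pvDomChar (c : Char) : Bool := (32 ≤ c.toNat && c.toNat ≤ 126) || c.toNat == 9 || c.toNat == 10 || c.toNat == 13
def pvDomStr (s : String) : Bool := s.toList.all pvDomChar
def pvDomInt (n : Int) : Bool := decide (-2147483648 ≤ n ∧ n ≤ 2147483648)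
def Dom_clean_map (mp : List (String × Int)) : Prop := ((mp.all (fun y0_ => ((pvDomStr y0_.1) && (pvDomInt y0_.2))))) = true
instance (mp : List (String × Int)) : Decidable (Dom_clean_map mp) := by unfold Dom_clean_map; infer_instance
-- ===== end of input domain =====

-- B replaces A's collect-then-apply structure (to_add dict, to_delete list, three loops) with a
-- single in-place pass `mp[key.lower()] = mp.pop(key)` over a snapshot of the keys; both A and B
-- mutate mp in place and return it, and the final state agrees (the theorem is about the return value).

-- Python str.isupper() ported by hand (PySem has only the per-char test): at least one cased
-- character and no lowercase one; exact on the stated ASCII domain, where cased = A-Z/a-z.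
def pyStrIsupper (s : String) : Bool :=
  (s.toList.any PySem.Chars.isupper) && !(s.toList.any PySem.Chars.islower)

-- ===== PORT A =====
def clean_map (mp : List (String × Int)) : List (String × Int) :=
  let m0 : PySem.Dict String Int := ⟨mp⟩
  -- for i in mp: if i.isupper(): to_add[i.lower()] = mp[i]; to_delete.append(i)
  -- (mp[i] with i drawn from mp's own keys is always present, so getD reads its exact value)
  let st := m0.keys.foldl
    (fun (st : List String × PySem.Dict String Int) i =>
      if pyStrIsupper i then
        (st.1 ++ [i], st.2.insert (PySem.Str.lower i) (m0.getD i 0))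
      else st)
    ([], PySem.Dict.empty)
  let to_delete := st.1
  let to_add := st.2
  -- for i_lower in to_add: mp[i_lower] = to_add[i_lower]
  let m1 := to_add.keys.foldl (fun m i_lower => m.insert i_lower (to_add.getD i_lower 0)) m0
  -- for j in to_delete: del mp[j]
  let m2 := to_delete.foldl (fun m j => m.erase j) m1
  m2.items

-- ===== PORT B =====
def clean_map_alt (mp : List (String × Int)) : List (String × Int) :=
  let m0 : PySem.Dict String Int := ⟨mp⟩
  -- for key in list(mp): if key.isupper(): mp[key.lower()] = mp.pop(key)
  (m0.keys.foldl
    (fun m key =>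
      if pyStrIsupper key then
        match m.pop? key with
        | some (v, m') => m'.insert (PySem.Str.lower key) v
        | none => m  -- KeyError unreachable: key comes from the snapshot and is removed at most once
      else m)
    m0).items

-- ===== PRECONDITION & SPEC =====
-- Pre_ excludes only association lists with duplicate keys: they represent no Python dict,
-- so A never receives them (every actual Python input satisfies Pre_).
def Pre_clean_map (mp : List (String × Int)) : Prop := (mp.map Prod.fst).Nodup
instance (mp : List (String × Int)) : Decidable (Pre_clean_map mp) := by unfold Pre_clean_map; infer_instance
def pvWitness_clean_map : (List (String × Int)) := [("AB", 1), ("x", 2)]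

def Spec_clean_map (mp : List (String × Int)) (out : List (String × Int)) : Prop := out = clean_map_alt mp
instance (mp : List (String × Int)) (out : List (String × Int)) : Decidable (Spec_clean_map mp out) := by unfold Spec_clean_map; infer_instance

-- ===== CLAIM (what is proved, stated in full; the proofs are below) =====
def Claim_equal_clean_map : Prop := ∀ (mp : List (String × Int)), Dom_clean_map mp → Pre_clean_map mp → Spec_clean_map mp (clean_map mp)

-- ===== LEMMAS AND PROOFS =====

-- the two phases both programs reduce to: insert every lowered uppercase key (with its original
-- value read from d0), then erase every uppercase key
def pvInsAll (d0 : PySem.Dict String Int) (I : List String) (d : PySem.Dict String Int) : PySem.Dict String Int :=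
  I.foldl (fun a i => a.insert (PySem.Str.lower i) (d0.getD i 0)) d

def pvErsAll (I : List String) (d : PySem.Dict String Int) : PySem.Dict String Int :=
  I.foldl (fun a j => a.erase j) d

-- ---- character facts ----
lemma pvIsupper_eq (c : Char) :
    PySem.Chars.isupper c = (decide (65 ≤ c.toNat) && decide (c.toNat ≤ 90)) := by
  simp [PySem.Chars.isupper]; rfl
lemma pvIslower_eq (c : Char) :
    PySem.Chars.islower c = (decide (97 ≤ c.toNat) && decide (c.toNat ≤ 122)) := by
  simp [PySem.Chars.islower]; rfl
lemma pvToNat_ofNat_small (n : Nat) (h : n < 55296) : (Char.ofNat n).toNat = n := by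
  rw [Char.toNat_ofNat]; rw [if_pos (Or.inl h)]

lemma pvLowerChar_islower_of_upper (c : Char) (h : PySem.Chars.isupper c = true) :
    PySem.Chars.islower (PySem.Chars.lowerChar c) = true := by
  rw [pvIsupper_eq] at h
  simp only [Bool.and_eq_true, decide_eq_true_eq] at h
  rw [PySem.Chars.lowerChar, if_pos (by rw [pvIsupper_eq]; simp; omega), pvIslower_eq,
    pvToNat_ofNat_small _ (by omega)]
  simp; omega

lemma pvLowerChar_of_not_upper (c : Char) (h : PySem.Chars.isupper c = false) :
    PySem.Chars.lowerChar c = c := by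
  simp [PySem.Chars.lowerChar, h]

lemma pvIsupper_lowerChar (c : Char) : PySem.Chars.isupper (PySem.Chars.lowerChar c) = false := by
  by_cases h : PySem.Chars.isupper c = true
  · have := pvLowerChar_islower_of_upper c h
    rw [pvIslower_eq] at this; rw [pvIsupper_eq]
    simp only [Bool.and_eq_true, decide_eq_true_eq] at this
    simp; omega
  · rw [pvLowerChar_of_not_upper c (by simpa using h)]; simpa using h

lemma pvLowerChar_injOn (c c' : Char) (hc : PySem.Chars.islower c = false)
    (hc' : PySem.Chars.islower c' = false)
    (h : PySem.Chars.lowerChar c = PySem.Chars.lowerChar c') : c = c' := by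
  by_cases h1 : PySem.Chars.isupper c = true <;> by_cases h2 : PySem.Chars.isupper c' = true
  · rw [PySem.Chars.lowerChar, if_pos h1, PySem.Chars.lowerChar, if_pos h2] at h
    have h3 := congrArg Char.toNat h
    rw [pvIsupper_eq] at h1 h2
    simp only [Bool.and_eq_true, decide_eq_true_eq] at h1 h2
    rw [pvToNat_ofNat_small _ (by omega), pvToNat_ofNat_small _ (by omega)] at h3
    have h4 : c.toNat = c'.toNat := by omega
    exact Char.ext (UInt32.toNat_inj.mp h4)
  · exfalso
    have := pvLowerChar_islower_of_upper c h1
    rw [h, pvLowerChar_of_not_upper c' (by simpa using h2)] at this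
    rw [this] at hc'; exact Bool.noConfusion hc'
  · exfalso
    have := pvLowerChar_islower_of_upper c' h2
    rw [← h, pvLowerChar_of_not_upper c (by simpa using h1)] at this
    rw [this] at hc; exact Bool.noConfusion hc
  · rwa [pvLowerChar_of_not_upper c (by simpa using h1),
      pvLowerChar_of_not_upper c' (by simpa using h2)] at h

-- ---- string facts: lower of anything is never isupper; lower is injective on isupper strings ----
lemma pvUp_lower_false (s : String) : pyStrIsupper (PySem.Str.lower s) = false := by
  rw [pyStrIsupper]
  have h1 : (PySem.Str.lower s).toList = PySem.Chars.lower s.toList := PySem.Str.toList_lower s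
  rw [h1, PySem.Chars.lower, List.any_map]
  simp only [Bool.and_eq_false_iff]
  left
  simp only [List.any_eq_false, Function.comp]
  intro c _
  simp [pvIsupper_lowerChar c]

lemma pvNe_lower_of_up (s t : String) (hs : pyStrIsupper s = true) : s ≠ PySem.Str.lower t := by
  intro h; rw [h, pvUp_lower_false t] at hs; exact Bool.noConfusion hs

lemma pvLower_inj (s t : String) (hs : pyStrIsupper s = true) (ht : pyStrIsupper t = true)
    (h : PySem.Str.lower s = PySem.Str.lower t) : s = t := by
  simp only [pyStrIsupper, Bool.and_eq_true, Bool.not_eq_true', List.any_eq_false] at hs ht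
  have h2 : PySem.Chars.lower s.toList = PySem.Chars.lower t.toList := by
    rw [← PySem.Str.toList_lower, ← PySem.Str.toList_lower, h]
  rw [PySem.Chars.lower, PySem.Chars.lower] at h2
  have h3 : s.toList = t.toList := by
    have hls := hs.2; have hlt := ht.2
    revert h2 hls hlt
    generalize s.toList = ls
    generalize t.toList = lt
    induction ls generalizing lt with
    | nil => cases lt <;> simp_all
    | cons a as ih =>
      cases lt with
      | nil => intro h2 _ _; exact absurd h2 (by simp)
      | cons b bs =>
        intro h2 hls hlt
        simp only [List.map_cons, List.cons.injEq] at h2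
        simp only [List.mem_cons, forall_eq_or_imp] at hls hlt
        exact by
          rw [pvLowerChar_injOn a b (Bool.eq_false_iff.mpr hls.1) (Bool.eq_false_iff.mpr hlt.1) h2.1, ih bs h2.2 hls.2 hlt.2]
  have h4 := congrArg String.ofList h3
  simpa [String.ofList_toList] using h4

-- ---- dict facts the prelude does not carry: erase at one key vs operations at another ----
lemma pvContains_erase (d : PySem.Dict String Int) (x y : String) (h : x ≠ y) :
    (d.erase y).contains x = d.contains x := by
  obtain ⟨l⟩ := d
  simp only [PySem.Dict.erase, PySem.Dict.contains, List.any_filter]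
  apply List.any_congr rfl
  intro p
  by_cases hp : p.1 = x
  · subst hp; simp [h]
  · simp [hp]

lemma pvGet?_erase_of_ne (d : PySem.Dict String Int) (x y : String) (h : x ≠ y) :
    (d.erase y).get? x = d.get? x := by
  obtain ⟨l⟩ := d
  simp only [PySem.Dict.erase, PySem.Dict.get?]
  congr 1
  induction l with
  | nil => rfl
  | cons p ps ih =>
    by_cases hp : p.1 = x
    · subst hp
      simp [h]
    · by_cases hq : p.1 = y <;> simp_all

lemma pvErase_insert_comm (d : PySem.Dict String Int) (x y : String) (v : Int) (h : x ≠ y) :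
    (d.erase y).insert x v = (d.insert x v).erase y := by
  obtain ⟨l⟩ := d
  have hc := pvContains_erase ⟨l⟩ x y h
  apply PySem.Dict.ext
  unfold PySem.Dict.insert
  rw [hc]
  by_cases hcon : (PySem.Dict.mk l).contains x = true
  · rw [hcon]
    simp only [if_true]
    show List.map (fun p => if (p.1 == x) = true then (x, v) else p) ((PySem.Dict.erase ⟨l⟩ y).items)
       = (PySem.Dict.erase ⟨List.map (fun p => if (p.1 == x) = true then (x, v) else p) l⟩ y).items
    unfold PySem.Dict.erase
    show List.map _ (List.filter _ l) = List.filter _ (List.map _ l)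
    rw [List.filter_map]
    congr 1
    apply List.filter_congr
    intro p _
    by_cases hp : p.1 = x
    · simp [Function.comp, hp]
    · simp [Function.comp, hp]
  · have hcon' : (PySem.Dict.mk l).contains x = false := Bool.eq_false_iff.mpr hcon
    rw [hcon']
    simp only [Bool.false_eq_true, if_false]
    show ((PySem.Dict.erase ⟨l⟩ y).items ++ [(x, v)])
       = (PySem.Dict.erase ⟨l ++ [(x, v)]⟩ y).items
    unfold PySem.Dict.erase
    show List.filter _ l ++ [(x, v)] = List.filter _ (l ++ [(x, v)])
    rw [List.filter_append]
    simp [h]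

-- ---- lookups travel unchanged through both phases at an untouched key ----
lemma pvGet?_insAll (d0 : PySem.Dict String Int) (I : List String) (d : PySem.Dict String Int)
    (k : String) (hk : ∀ i ∈ I, k ≠ PySem.Str.lower i) :
    (pvInsAll d0 I d).get? k = d.get? k := by
  induction I generalizing d with
  | nil => rfl
  | cons i is ih =>
    rw [pvInsAll, List.foldl_cons, ← pvInsAll, ih _ (fun j hj => hk j (List.mem_cons_of_mem i hj)),
      PySem.Dict.get?_insert_of_ne _ _ (hk i (List.mem_cons_self))]

lemma pvGet?_ersAll (I : List String) (d : PySem.Dict String Int) (k : String)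
    (hk : ∀ i ∈ I, k ≠ i) :
    (pvErsAll I d).get? k = d.get? k := by
  induction I generalizing d with
  | nil => rfl
  | cons i is ih =>
    rw [pvErsAll, List.foldl_cons, ← pvErsAll, ih _ (fun j hj => hk j (List.mem_cons_of_mem i hj)),
      pvGet?_erase_of_ne _ _ _ (hk i (List.mem_cons_self))]

lemma pvInsert_ersAll (I : List String) (d : PySem.Dict String Int) (x : String) (v : Int)
    (hx : ∀ i ∈ I, x ≠ i) :
    (pvErsAll I d).insert x v = pvErsAll I (d.insert x v) := by
  induction I generalizing d with
  | nil => rfl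
  | cons i is ih =>
    rw [pvErsAll, List.foldl_cons, ← pvErsAll, ih _ (fun j hj => hx j (List.mem_cons_of_mem i hj)),
      pvErase_insert_comm _ _ _ _ (hx i (List.mem_cons_self))]
    rfl

-- ---- B's loop invariant: after processing prefix ps, the state is exactly the two-phase form ----
lemma pvLoopB (d0 : PySem.Dict String Int) (ks ps : List String)
    (hnd : (ps ++ ks).Nodup) (hkeys : ∀ k ∈ ks, k ∈ d0.keys) :
    ks.foldl
      (fun m key =>
        if pyStrIsupper key then
          match m.pop? key with
          | some (v, m') => m'.insert (PySem.Str.lower key) v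
          | none => m
        else m)
      (pvErsAll (ps.filter pyStrIsupper) (pvInsAll d0 (ps.filter pyStrIsupper) d0))
    = pvErsAll ((ps ++ ks).filter pyStrIsupper)
        (pvInsAll d0 ((ps ++ ks).filter pyStrIsupper) d0) := by
  induction ks generalizing ps with
  | nil => simp
  | cons k ks' ih =>
    have hnd' : ((ps ++ [k]) ++ ks').Nodup := by simpa using hnd
    have hkeys' : ∀ j ∈ ks', j ∈ d0.keys := fun j hj => hkeys j (List.mem_cons_of_mem k hj)
    rw [List.foldl_cons]
    by_cases hup : pyStrIsupper k = true
    · -- the processed key is uppercase: pop it and insert its lowered form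
      set I := ps.filter pyStrIsupper with hI
      have hIps : ∀ i ∈ I, i ∈ ps := fun i hi => (List.mem_filter.mp hi).1
      have hIup : ∀ i ∈ I, pyStrIsupper i = true := fun i hi => (List.mem_filter.mp hi).2
      have hknotps : k ∉ ps := by
        intro hk
        have := List.disjoint_of_nodup_append hnd
        exact this hk List.mem_cons_self
      have hkI : ∀ i ∈ I, k ≠ i := fun i hi hki => hknotps (hki ▸ hIps i hi)
      have hlow : ∀ i ∈ I, k ≠ PySem.Str.lower i := fun i _ => pvNe_lower_of_up k i hup
      -- the current state still holds k with its original value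
      have hget : (pvErsAll I (pvInsAll d0 I d0)).get? k = d0.get? k := by
        rw [pvGet?_ersAll _ _ _ hkI, pvGet?_insAll _ _ _ _ hlow]
      obtain ⟨v, hv⟩ : ∃ v, d0.get? k = some v := by
        rcases ho : d0.get? k with _ | v
        · exact absurd ((PySem.Dict.get?_eq_none_iff_not_mem_keys d0 k).mp ho)
            (by simp [hkeys k List.mem_cons_self])
        · exact ⟨v, rfl⟩
      have hgetD : d0.getD k 0 = v := by rw [PySem.Dict.getD_eq_get?_getD, hv]; rfl
      have hpop :
          (pvErsAll I (pvInsAll d0 I d0)).pop? k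
            = some (v, (pvErsAll I (pvInsAll d0 I d0)).erase k) := by
        rw [PySem.Dict.pop?, hget, hv]; rfl
      have hne : PySem.Str.lower k ≠ k := (pvNe_lower_of_up k k hup).symm
      have hcond : ∀ i ∈ I, PySem.Str.lower k ≠ i :=
        fun i hi => (pvNe_lower_of_up i k (hIup i hi)).symm
      have hstep :
          (((pvErsAll I (pvInsAll d0 I d0)).erase k).insert (PySem.Str.lower k) v)
            = pvErsAll ((ps ++ [k]).filter pyStrIsupper)
                (pvInsAll d0 ((ps ++ [k]).filter pyStrIsupper) d0) := by
        have hfil : (ps ++ [k]).filter pyStrIsupper = I ++ [k] := by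
          rw [List.filter_append]; simp [hup, hI]
        have e1 : pvInsAll d0 (I ++ [k]) d0 = (pvInsAll d0 I d0).insert (PySem.Str.lower k) v := by
          simp only [pvInsAll, List.foldl_append, List.foldl_cons, List.foldl_nil, hgetD]
        have e2 : ∀ X : PySem.Dict String Int, pvErsAll (I ++ [k]) X = (pvErsAll I X).erase k := by
          intro X
          simp only [pvErsAll, List.foldl_append, List.foldl_cons, List.foldl_nil]
        rw [hfil, e1, e2, ← pvInsert_ersAll I _ _ _ hcond,
          pvErase_insert_comm _ _ _ _ hne]
      simp only [hup, if_true, hpop]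
      rw [hstep]
      have hres := ih (ps ++ [k]) hnd' hkeys'
      have hl : ps ++ [k] ++ ks' = ps ++ k :: ks' := by simp
      rw [hl] at hres
      exact hres
    · have hup' : pyStrIsupper k = false := Bool.eq_false_iff.mpr hup
      rw [hup']
      simp only [Bool.false_eq_true, if_false]
      have hfil : (ps ++ [k]).filter pyStrIsupper = ps.filter pyStrIsupper := by
        rw [List.filter_append]; simp [hup']
      have := ih (ps ++ [k]) hnd' hkeys'
      rw [hfil] at this
      rw [this]
      congr 1 <;> simp

-- ---- A reduces to the same two-phase form ----
lemma pvCleanA (mp : List (String × Int)) (hnd : (PySem.Dict.mk mp : PySem.Dict String Int).keys.Nodup) :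
    clean_map mp
      = (pvErsAll (((PySem.Dict.mk mp : PySem.Dict String Int).keys).filter pyStrIsupper)
          (pvInsAll (PySem.Dict.mk mp)
            (((PySem.Dict.mk mp : PySem.Dict String Int).keys).filter pyStrIsupper)
            (PySem.Dict.mk mp))).items := by
  simp only [clean_map]
  set d0 : PySem.Dict String Int := PySem.Dict.mk mp with hd0
  set U : List String := d0.keys.filter pyStrIsupper with hUdef
  -- split the accumulator pair of the first loop into two independent folds
  have hpair :
      d0.keys.foldl
        (fun (st : List String × PySem.Dict String Int) i =>
          if pyStrIsupper i then
            (st.1 ++ [i], st.2.insert (PySem.Str.lower i) (d0.getD i 0))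
          else st)
        ([], PySem.Dict.empty)
      = (d0.keys.foldl (fun a i => if pyStrIsupper i then a ++ [i] else a) [],
         d0.keys.foldl (fun t i => if pyStrIsupper i then t.insert (PySem.Str.lower i) (d0.getD i 0) else t) PySem.Dict.empty) := by
    have hsplit := PySem.List.foldl_prod_mk
      (f := fun (a : List String) i => if pyStrIsupper i then a ++ [i] else a)
      (g := fun (t : PySem.Dict String Int) i =>
        if pyStrIsupper i then t.insert (PySem.Str.lower i) (d0.getD i 0) else t)
      d0.keys [] PySem.Dict.empty
    exact Eq.trans
      (PySem.List.foldl_congr_mem d0.keys _ _ ([], PySem.Dict.empty)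
        (by intro st i _; by_cases h : pyStrIsupper i = true <;> simp [h]))
      hsplit
  rw [hpair]
  rw [PySem.List.foldl_append_if_eq_filter, PySem.List.foldl_if_eq_foldl_filter]
  simp only [List.nil_append, ← hUdef]
  set ta : PySem.Dict String Int :=
    U.foldl (fun t i => t.insert (PySem.Str.lower i) (d0.getD i 0)) PySem.Dict.empty with hta
  have hU : U.Nodup := hnd.filter _
  have hUup : ∀ i ∈ U, pyStrIsupper i = true := fun i hi => (List.mem_filter.mp hi).2
  have hmap : (U.map PySem.Str.lower).Nodup :=
    List.Nodup.map_on (fun x hx y hy hxy => pvLower_inj x y (hUup x hx) (hUup y hy) hxy) hU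
  have hitems : ta.items = U.map (fun i => (PySem.Str.lower i, d0.getD i 0)) := by
    rw [hta, PySem.Dict.items_foldl_insert_fresh U PySem.Str.lower (fun i => d0.getD i 0)
      PySem.Dict.empty (fun a _ => PySem.Dict.contains_empty _) hmap]
    rfl
  have hkeys_ta : ta.keys = U.map PySem.Str.lower := by
    show ta.items.map _ = _
    rw [hitems, List.map_map]
    rfl
  have hndk : ta.keys.Nodup := by rw [hkeys_ta]; exact hmap
  have hgetD_ta : ∀ i ∈ U, ta.getD (PySem.Str.lower i) 0 = d0.getD i 0 := by
    intro i hi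
    exact PySem.Dict.getD_of_mem_items ta
      (by rw [hitems]; exact List.mem_map_of_mem hi) hndk 0
  rw [hkeys_ta, List.foldl_map,
    PySem.List.foldl_congr_mem U
      (fun (m : PySem.Dict String Int) i => m.insert (PySem.Str.lower i) (ta.getD (PySem.Str.lower i) 0))
      (fun (m : PySem.Dict String Int) i => m.insert (PySem.Str.lower i) (d0.getD i 0)) d0
      (by
        intro m i hi
        show m.insert (PySem.Str.lower i) (ta.getD (PySem.Str.lower i) 0)
           = m.insert (PySem.Str.lower i) (d0.getD i 0)
        rw [hgetD_ta i hi])]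
  rfl

-- ---- B reduces to it too ----
lemma pvCleanB (mp : List (String × Int)) (hnd : (PySem.Dict.mk mp : PySem.Dict String Int).keys.Nodup) :
    clean_map_alt mp
      = (pvErsAll (((PySem.Dict.mk mp : PySem.Dict String Int).keys).filter pyStrIsupper)
          (pvInsAll (PySem.Dict.mk mp)
            (((PySem.Dict.mk mp : PySem.Dict String Int).keys).filter pyStrIsupper)
            (PySem.Dict.mk mp))).items := by
  simp only [clean_map_alt]
  have h := pvLoopB (PySem.Dict.mk mp) (PySem.Dict.mk mp : PySem.Dict String Int).keys []
    (by simpa using hnd) (fun k hk => hk)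
  simp only [List.nil_append, List.filter_nil] at h
  rw [← h]
  rfl

-- ===== VERDICT (by name: the statement is the Claim_ definition above) =====
theorem clean_map_spec : Claim_equal_clean_map := by
  intro mp _ hpre
  have hnd : (PySem.Dict.mk mp : PySem.Dict String Int).keys.Nodup := by
    simpa [PySem.Dict.keys] using hpre
  show clean_map mp = clean_map_alt mp
  rw [pvCleanA mp hnd, pvCleanB mp hnd]
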